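-- pv_equiv track=rewrite | github.com/alpw/ProjectEuler | euler 12.py | carpanbul
-- ===== SOURCE A (Python) =====
-- import math
--
-- def asalmı(x):
--     for e in range(2,int(math.sqrt(x))+1):
--         if(x % e == 0):
--             return False
--     return True
--
-- def carpanbul(x):
--     carpanlar = []
--     if(asalmı(x)):
--         carpanlar.append(x)
--         carpanlar.append(1)
--     else:
--         for xin in range(1,int(math.sqrt(x))+1):
--             if(x % xin == 0):
--                 carpanlar.append(xin)
--                 carpanlar.append(int(x/xin))
--     return carpanlar
-- ===== SOURCE B (Python) =====
-- def carpanbul(x):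
--     if x < 2:
--         return [x, 1]
--     # prime factorization of x by dividing factors out
--     n = x
--     fac = []
--     p = 2
--     while p * p <= n:
--         if n % p == 0:
--             e = 0
--             while n % p == 0:
--                 n //= p
--                 e += 1
--             fac.append((p, e))
--         p += 1
--     if n > 1:
--         fac.append((n, 1))
--     if fac == [(x, 1)]:
--         return [x, 1]  # prime
--     # build all divisors combinatorially from the factorization, sort ascending
--     divs = [1]
--     for (p, e) in fac:
--         divs = [d * p ** k for d in divs for k in range(e + 1)]
--     divs.sort()
--     out = []
--     for d in divs:
--         if d * d > x:
--             break
--         out += [d, x // d]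
--     return out
-- ===== Notes on version B (the rewrite author's own statement) =====
-- stated objective: alternative
-- what changed: B does not scan for divisors at all: it computes the prime factorization of x by repeatedly dividing factors out, generates the complete divisor list combinatorially from the factorization, sorts it, and emits [d, x//d] for the sorted divisors with d*d <= x; primality (A's separate asalmi scan) falls out of the factorization being [(x,1)].
import Mathlib
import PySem

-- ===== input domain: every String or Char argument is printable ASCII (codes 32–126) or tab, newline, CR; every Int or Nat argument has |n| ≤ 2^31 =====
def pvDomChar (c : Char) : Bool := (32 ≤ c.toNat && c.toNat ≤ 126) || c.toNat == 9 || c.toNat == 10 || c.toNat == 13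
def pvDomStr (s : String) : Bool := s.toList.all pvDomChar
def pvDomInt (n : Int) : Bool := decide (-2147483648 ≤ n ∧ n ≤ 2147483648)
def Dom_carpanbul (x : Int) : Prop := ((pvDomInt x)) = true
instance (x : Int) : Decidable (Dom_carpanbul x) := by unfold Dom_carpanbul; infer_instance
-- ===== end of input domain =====

-- B replaces A's trial scans with a prime factorization of x and combinatorial generation of all divisors from it (objective: alternative, same asymptotic cost; return-value equivalence on x >= 0).


-- ===== PORT A =====
-- int(math.sqrt(x)): exact (= floor sqrt) for 0 ≤ x ≤ 2^31 (the Dom_∧Pre_ range); Python raises ValueError for x < 0 (excluded by Pre_)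
def pyIntSqrt (x : Int) : Int := ((Int.toNat x).sqrt : Int)

-- port of asalmı: 'for e in range(2, int(sqrt(x))+1): if x % e == 0: return False; return True'
def asalmi (x : Int) : Bool :=
  !(PySem.List.pyRange 2 (pyIntSqrt x + 1) 1).any (fun e => PySem.Int.mod x e == 0)

-- int(x/xin) is float true division then truncation = PySem.Int.truncdiv (exact, |x| ≤ 2^31 < 2^53)
def carpanbul (x : Int) : List Int :=
  if asalmi x then [x, 1]
  else
    (PySem.List.pyRange 1 (pyIntSqrt x + 1) 1).foldl
      (fun acc xin =>
        if PySem.Int.mod x xin == 0 then acc ++ [xin, PySem.Int.truncdiv x xin] else acc) []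

-- ===== PORT B =====
-- inner 'while n % p == 0: n //= p; e += 1' of Source B — returns (final n, e); the Nat fuel only
-- makes the recursion structural (n.toNat steps always suffice at the call site, where 2 ≤ p and 1 ≤ n)
def divOutGo : Nat → Int → Int → Int × Nat
  | 0, n, _ => (n, 0)
  | f + 1, n, p =>
    if PySem.Int.mod n p == 0 then
      let r := divOutGo f (PySem.Int.floordiv n p) p
      (r.1, r.2 + 1)
    else (n, 0)

def divOut (n p : Int) : Int × Nat := divOutGo n.toNat n p

-- outer 'while p * p <= n: …' of Source B's factorization; returns (fac, final n); fuel as above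
def factorLoopGo : Nat → Int → Int → List (Int × Nat) × Int
  | 0, n, _ => ([], n)
  | f + 1, n, p =>
    if p * p ≤ n then
      if PySem.Int.mod n p == 0 then
        let r := divOut n p
        let s := factorLoopGo f r.1 (p + 1)
        ((p, r.2) :: s.1, s.2)
      else factorLoopGo f n (p + 1)
    else ([], n)

def factorLoop (n p : Int) : List (Int × Nat) × Int := factorLoopGo (n + 1 - p).toNat n p

-- 'divs = [d * p**k for d in divs for k in range(e+1)]'
def divStep (ds : List Int) (pe : Int × Nat) : List Int :=
  ds.flatMap (fun d => (List.range (pe.2 + 1)).map (fun k => d * pe.1 ^ k))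

def carpanbul_alt (x : Int) : List Int :=
  if x < 2 then [x, 1]
  else
    let r := factorLoop x 2
    let fac := if 1 < r.2 then r.1 ++ [(r.2, 1)] else r.1
    if fac == [(x, 1)] then [x, 1]
    else
      let divs := PySem.List.sorted (fac.foldl divStep [1]) (fun d => d) false
      (divs.takeWhile (fun d => decide (d * d ≤ x))).flatMap
        (fun d => [d, PySem.Int.floordiv x d])

-- ===== PRECONDITION & SPEC =====
-- Pre_ excludes exactly x < 0, where math.sqrt raises ValueError in A.
def Pre_carpanbul (x : Int) : Prop := 0 ≤ x
instance (x : Int) : Decidable (Pre_carpanbul x) := by unfold Pre_carpanbul; infer_instance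
def pvWitness_carpanbul : Int := (36)

def Spec_carpanbul (x : Int) (out : List Int) : Prop := out = carpanbul_alt x
instance (x : Int) (out : List Int) : Decidable (Spec_carpanbul x out) := by unfold Spec_carpanbul; infer_instance

-- ===== CLAIM =====
def Claim_equal_carpanbul : Prop := ∀ (x : Int), Dom_carpanbul x → Pre_carpanbul x → Spec_carpanbul x (carpanbul x)

-- ===== LEMMAS AND PROOFS =====

-- proof-only abbreviations
def prodAll (l : List (Int × Nat)) : List Int := l.foldl divStep [1]

def fullFacOf (r : List (Int × Nat) × Int) : List (Int × Nat) :=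
  if 1 < r.2 then r.1 ++ [(r.2, 1)] else r.1

-- GoodFac n l: the divisor list generated from l is exactly the positive divisors of n, without repetition
def GoodFac (n : Int) (l : List (Int × Nat)) : Prop :=
  (∀ d : Int, d ∈ prodAll l ↔ 1 ≤ d ∧ d ∣ n) ∧ (prodAll l).Nodup

theorem foldl_divStep_eq (l : List (Int × Nat)) (ds : List Int) :
    l.foldl divStep ds = ds.flatMap (fun a => (l.foldl divStep [1]).map (fun d => a * d)) := by
  induction l generalizing ds with
  | nil => simp
  | cons pe t ih =>
    rw [List.foldl_cons, List.foldl_cons, ih (divStep ds pe), ih (divStep [1] pe)]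
    simp [divStep, List.flatMap_assoc, List.map_flatMap, List.flatMap_map, List.map_map,
      Function.comp, mul_assoc]

theorem prodAll_cons (p : Int) (e : Nat) (l : List (Int × Nat)) :
    ((p, e) :: l).foldl divStep [1] =
      (List.range (e + 1)).flatMap (fun k => (l.foldl divStep [1]).map (fun d => p ^ k * d)) := by
  rw [List.foldl_cons, foldl_divStep_eq]
  simp [divStep, List.flatMap_map, List.map_map, Function.comp]

theorem good_nil : GoodFac 1 [] := by
  constructor
  · intro d
    simp [prodAll]
    constructor
    · rintro rfl; exact ⟨le_refl 1, dvd_refl 1⟩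
    · rintro ⟨h1, h2⟩
      exact le_antisymm (Int.le_of_dvd one_pos h2) h1 |>.symm ▸ rfl
  · simp [prodAll]

theorem good_cons (p : Int) (e : Nat) (n' : Int) (l : List (Int × Nat))
    (hp2 : 2 ≤ p) (hp : Prime p) (hpp : ¬ p ∣ n') (hn' : 1 ≤ n')
    (h : GoodFac n' l) : GoodFac (p ^ e * n') ((p, e) :: l) := by
  obtain ⟨hmem, hnd⟩ := h
  constructor
  · intro d
    rw [prodAll, prodAll_cons]
    simp only [List.mem_flatMap, List.mem_range, List.mem_map]
    constructor
    · rintro ⟨k, hk, d', hd', rfl⟩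
      obtain ⟨h1, h2⟩ := (hmem d').mp hd'
      have hpk : (0:Int) < p ^ k := pow_pos (by omega) k
      refine ⟨by nlinarith, mul_dvd_mul (pow_dvd_pow p (by omega)) h2⟩
    · rintro ⟨h1, h2⟩
      -- move to ℕ
      have hd0 : 0 ≤ d := by omega
      set D := d.toNat with hD
      set P := p.toNat with hP
      set N := n'.toNat with hN
      have hdd : d = (D : Int) := by omega
      have hpp' : p = (P : Int) := by omega
      have hnn : n' = (N : Int) := by omega
      have hPprime : P.Prime := by
        rw [Int.prime_iff_natAbs_prime] at hp
        simpa [hpp'] using hp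
      have hdvdN : D ∣ P ^ e * N := by
        have : (D : Int) ∣ (P : Int) ^ e * (N : Int) := by rw [← hdd, ← hpp', ← hnn]; exact h2
        exact_mod_cast this
      have hndN : ¬ P ∣ N := by
        intro hc
        exact hpp (by rw [hpp', hnn]; exact_mod_cast hc)
      obtain ⟨a, b, ha, hb, hab⟩ := exists_dvd_and_dvd_of_dvd_mul hdvdN
      obtain ⟨k, hk, rfl⟩ := (Nat.dvd_prime_pow hPprime).mp ha
      refine ⟨k, by omega, (b : Int), (hmem b).mpr ⟨?_, ?_⟩, ?_⟩
      · have hb0 : b ≠ 0 := by rintro rfl; simp at hb; omega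
        omega
      · rw [hnn]; exact_mod_cast hb
      · rw [hdd, hab, hpp']; push_cast; ring
  · rw [prodAll, prodAll_cons]
    rw [List.nodup_flatMap]
    constructor
    · intro k _
      exact List.Nodup.map (fun a b hab => by
        have hpk : (p : Int) ^ k ≠ 0 := pow_ne_zero k (by omega)
        exact mul_left_cancel₀ hpk hab) hnd
    · have hrange : (List.range (e + 1)).Pairwise (· < ·) := List.pairwise_lt_range
      refine hrange.imp ?_
      intro k j hkj
      intro z hz1 hz2
      simp only [List.mem_map] at hz1 hz2
      obtain ⟨d', hd', hzd'⟩ := hz1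
      obtain ⟨d'', hd'', hzd''⟩ := hz2
      obtain ⟨h1', h2'⟩ := (hmem d').mp hd'
      have heq2 : p ^ k * d' = p ^ j * d'' := by rw [hzd', hzd'']
      have hsplit : p ^ j = p ^ k * p ^ (j - k) := by
        rw [← pow_add]; congr 1; omega
      have hpk : (p : Int) ^ k ≠ 0 := pow_ne_zero k (by omega)
      have : d' = p ^ (j - k) * d'' := by
        apply mul_left_cancel₀ hpk
        rw [heq2, hsplit]; ring
      have hpd : p ∣ d' := by
        rw [this]
        exact Dvd.dvd.mul_right (dvd_pow_self p (by omega)) d''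
      exact hpp (dvd_trans hpd h2')

theorem int_prime_of_nat (q : Int) (h2 : 2 ≤ q) (h : q.toNat.Prime) : Prime q := by
  rw [Int.prime_iff_natAbs_prime]
  have hq : q.natAbs = q.toNat := by omega
  rwa [hq]

theorem prime_of_no_small_divisor (p : Int) (h2 : 2 ≤ p)
    (hinv : ∀ q : Int, 2 ≤ q → q < p → ¬ q ∣ p) : Prime p := by
  apply int_prime_of_nat p h2
  rw [Nat.prime_def_lt]
  refine ⟨by omega, ?_⟩
  intro m hm hdvd
  by_contra hne
  have hm2 : 2 ≤ m := by
    rcases Nat.lt_or_ge m 2 with h | h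
    · interval_cases m
      · simp at hdvd; omega
      · omega
    · exact h
  refine hinv (m : Int) (by exact_mod_cast hm2) (by omega) ?_
  have : (m : Int) ∣ (p.toNat : Int) := Int.natCast_dvd_natCast.mpr hdvd
  rwa [Int.toNat_of_nonneg (by omega)] at this

theorem prime_of_no_sqrt_divisor (n : Int) (h2 : 2 ≤ n)
    (h : ∀ q : Int, 2 ≤ q → q * q ≤ n → ¬ q ∣ n) : Prime n := by
  apply int_prime_of_nat n h2
  rw [Nat.prime_def_lt]
  refine ⟨by omega, ?_⟩
  intro m hm hdvd
  by_contra hne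
  have hm2 : 2 ≤ m := by
    rcases Nat.lt_or_ge m 2 with hlt | hge
    · interval_cases m
      · simp at hdvd; omega
      · omega
    · exact hge
  obtain ⟨c, hc⟩ := hdvd
  have hc2 : 2 ≤ c := by
    rcases Nat.lt_or_ge c 2 with hlt | hge
    · interval_cases c
      · omega
      · omega
    · exact hge
  have hmc : min m c * min m c ≤ n.toNat := by
    calc min m c * min m c ≤ m * c := Nat.mul_le_mul (Nat.min_le_left _ _) (Nat.min_le_right _ _)
    _ = n.toNat := hc.symm
  have hdvd2 : ((min m c : Nat) : Int) ∣ n := by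
    rcases Nat.le_total m c with hle | hle
    · rw [Nat.min_eq_left hle]
      have : (m:Int) ∣ (n.toNat : Int) := Int.natCast_dvd_natCast.mpr ⟨c, hc⟩
      rwa [Int.toNat_of_nonneg (by omega)] at this
    · rw [Nat.min_eq_right hle]
      have : (c:Int) ∣ (n.toNat : Int) := Int.natCast_dvd_natCast.mpr ⟨m, by rw [hc, Nat.mul_comm]⟩
      rwa [Int.toNat_of_nonneg (by omega)] at this
  refine h ((min m c : Nat) : Int) (by exact_mod_cast le_min hm2 hc2) ?_ hdvd2
  have h3 : ((min m c : Nat) : Int) * ((min m c : Nat) : Int) ≤ ((n.toNat : Nat) : Int) := by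
    exact_mod_cast hmc
  rwa [Int.toNat_of_nonneg (by omega)] at h3

theorem prime_dvd_eq (n d : Int) (hp : Prime n) (h2 : 2 ≤ n) (hd : 1 ≤ d) (hdvd : d ∣ n) :
    d = 1 ∨ d = n := by
  have hP : n.toNat.Prime := by
    rw [Int.prime_iff_natAbs_prime] at hp
    have : n.natAbs = n.toNat := by omega
    rwa [this] at hp
  have hdvdN : d.toNat ∣ n.toNat := by
    have : (d.toNat : Int) ∣ (n.toNat : Int) := by
      rw [Int.toNat_of_nonneg (by omega), Int.toNat_of_nonneg (by omega)]; exact hdvd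
    exact_mod_cast this
  rcases (Nat.Prime.eq_one_or_self_of_dvd hP _ hdvdN) with h | h
  · left; omega
  · right; omega

theorem divOutGo_fst_le (f : Nat) : ∀ n p : Int, 0 ≤ n → 2 ≤ p → (divOutGo f n p).1 ≤ n := by
  induction f with
  | zero => intro n p hn hp; exact le_refl n
  | succ f ih =>
    intro n p hn hp
    rw [divOutGo]
    by_cases hm : (PySem.Int.mod n p == 0) = true
    · rw [if_pos hm]
      have hfd : PySem.Int.floordiv n p = n / p := PySem.Int.floordiv_eq_ediv_of_pos (by omega)
      have h0 : 0 ≤ n / p := Int.ediv_nonneg (by omega) (by omega)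
      have hle : n / p ≤ n := by
        rcases lt_or_ge n 1 with h1 | h1
        · have : n = 0 := by omega
          subst this; simp
        · have : n / p < n := by rw [Int.ediv_lt_iff_lt_mul (by omega)]; nlinarith
          omega
      have := ih (PySem.Int.floordiv n p) p (by omega) hp
      show (divOutGo f (PySem.Int.floordiv n p) p).1 ≤ n
      omega
    · rw [if_neg hm]

theorem divOutGo_spec (f : Nat) : ∀ n p : Int, 2 ≤ p → 1 ≤ n → n.toNat ≤ f →
    n = p ^ (divOutGo f n p).2 * (divOutGo f n p).1 ∧ 1 ≤ (divOutGo f n p).1 ∧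
      ¬ p ∣ (divOutGo f n p).1 := by
  induction f with
  | zero => intro n p hp hn hf; exact absurd hf (by omega)
  | succ f ih =>
    intro n p hp hn hf
    rw [divOutGo]
    by_cases hm : (PySem.Int.mod n p == 0) = true
    · rw [if_pos hm]
      rw [beq_iff_eq, PySem.Int.mod_eq_zero_iff_dvd] at hm
      have hfd : PySem.Int.floordiv n p = n / p := PySem.Int.floordiv_eq_ediv_of_pos (by omega)
      have hple : p ≤ n := Int.le_of_dvd (by omega) hm
      have hq1 : 1 ≤ n / p := by
        rw [Int.le_ediv_iff_mul_le (by omega)]; omega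
      have hlt : n / p < n := by rw [Int.ediv_lt_iff_lt_mul (by omega)]; nlinarith
      obtain ⟨heq, hpos, hnd⟩ := ih (PySem.Int.floordiv n p) p hp (by rw [hfd]; omega)
        (by rw [hfd]; omega)
      have hcancel : p * PySem.Int.floordiv n p = n := by rw [hfd]; exact Int.mul_ediv_cancel' hm
      refine ⟨?_, hpos, hnd⟩
      show n = p ^ ((divOutGo f (PySem.Int.floordiv n p) p).2 + 1) *
        (divOutGo f (PySem.Int.floordiv n p) p).1
      rw [pow_succ]
      nlinarith [heq, hcancel]
    · rw [if_neg hm]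
      refine ⟨by simp, by simpa using hn, ?_⟩
      rw [beq_iff_eq, PySem.Int.mod_eq_zero_iff_dvd] at hm
      simpa using hm

theorem divOut_spec (n p : Int) (hp : 2 ≤ p) (hn : 1 ≤ n) :
    n = p ^ (divOut n p).2 * (divOut n p).1 ∧ 1 ≤ (divOut n p).1 ∧ ¬ p ∣ (divOut n p).1 :=
  divOutGo_spec n.toNat n p hp hn (le_refl _)

theorem fullFacOf_cons (p : Int) (e : Nat) (f : List (Int × Nat)) (m : Int) :
    fullFacOf ((p, e) :: f, m) = (p, e) :: fullFacOf (f, m) := by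
  unfold fullFacOf
  split <;> simp

theorem factorLoopGo_base (n p : Int) (hp : 2 ≤ p) (hn : 1 ≤ n) (hlt : n < p * p)
    (hinv : ∀ q : Int, 2 ≤ q → q < p → ¬ q ∣ n) :
    GoodFac n (fullFacOf (([], n) : List (Int × Nat) × Int)) := by
  rcases lt_or_ge n 2 with h2 | h2
  · have hn1 : n = 1 := by omega
    subst hn1
    simpa [fullFacOf] using good_nil
  · have hprime : Prime n := by
      apply prime_of_no_sqrt_divisor n h2
      intro q hq1 hq2
      apply hinv q hq1
      nlinarith
    have hfull : fullFacOf (([] : List (Int × Nat)), n) = [(n, 1)] := by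
      simp [fullFacOf]; omega
    rw [hfull]
    have := good_cons n 1 1 [] h2 hprime
      (fun hc => by have := Int.eq_one_of_dvd_one (by omega) hc; omega)
      (le_refl 1) good_nil
    simpa using this

theorem factorLoopGo_spec (f : Nat) : ∀ n p : Int, 2 ≤ p → 1 ≤ n → (n + 1 - p).toNat ≤ f →
    (∀ q : Int, 2 ≤ q → q < p → ¬ q ∣ n) →
    GoodFac n (fullFacOf (factorLoopGo f n p)) := by
  induction f with
  | zero =>
    intro n p hp hn hf hinv
    have hnp : n < p := by omega
    exact factorLoopGo_base n p hp hn (by nlinarith) hinv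
  | succ f ih =>
    intro n p hp hn hf hinv
    rw [factorLoopGo]
    by_cases hpp : p * p ≤ n
    · have hple : p ≤ n := by nlinarith
      rw [if_pos (by simpa using hpp)]
      by_cases hm : (PySem.Int.mod n p == 0) = true
      · rw [if_pos hm]
        rw [beq_iff_eq, PySem.Int.mod_eq_zero_iff_dvd] at hm
        obtain ⟨heq, hn', hnd⟩ := divOut_spec n p hp hn
        have hprime : Prime p := by
          apply prime_of_no_small_divisor p hp
          intro q hq1 hq2 hq3
          exact hinv q hq1 hq2 (dvd_trans hq3 hm)
        have hr1le : (divOut n p).1 ≤ n := divOutGo_fst_le n.toNat n p (by omega) hp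
        show GoodFac n (fullFacOf ((p, (divOut n p).2) :: (factorLoopGo f (divOut n p).1 (p + 1)).1,
          (factorLoopGo f (divOut n p).1 (p + 1)).2))
        rcases hDO : divOut n p with ⟨R1, E⟩
        rw [hDO] at heq hn' hnd hr1le
        simp only [hDO]
        have hr1dvd : R1 ∣ n := ⟨p ^ E, heq.trans (mul_comm _ _)⟩
        have hinv' : ∀ q : Int, 2 ≤ q → q < p + 1 → ¬ q ∣ R1 := by
          intro q hq1 hq2 hq3
          rcases lt_or_eq_of_le (by omega : q ≤ p) with h | h
          · exact hinv q hq1 h (dvd_trans hq3 hr1dvd)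
          · subst h; exact hnd hq3
        have ihres := ih R1 (p + 1) (by omega) hn' (by omega) hinv'
        rw [fullFacOf_cons, heq]
        exact good_cons p E R1 (fullFacOf (factorLoopGo f R1 (p + 1))) hp hprime hnd hn' ihres
      · rw [if_neg hm]
        apply ih n (p + 1) (by omega) hn (by omega)
        intro q hq1 hq2 hq3
        rcases lt_or_eq_of_le (by omega : q ≤ p) with h | h
        · exact hinv q hq1 h hq3
        · subst h
          rw [beq_iff_eq, PySem.Int.mod_eq_zero_iff_dvd] at hm
          exact hm hq3
    · rw [if_neg (by simpa using hpp)]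
      exact factorLoopGo_base n p hp hn (lt_of_not_ge hpp) hinv

theorem factorLoop_spec (n p : Int) :
    2 ≤ p → 1 ≤ n → (∀ q : Int, 2 ≤ q → q < p → ¬ q ∣ n) →
    GoodFac n (fullFacOf (factorLoop n p)) :=
  fun hp hn hinv => factorLoopGo_spec ((n + 1 - p).toNat) n p hp hn (le_refl _) hinv

theorem factorLoopGo_eq_nil (f : Nat) : ∀ n p : Int, 2 ≤ p →
    (∀ q : Int, 2 ≤ q → q * q ≤ n → ¬ q ∣ n) → factorLoopGo f n p = ([], n) := by
  induction f with
  | zero => intro n p hp h; rfl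
  | succ f ih =>
    intro n p hp h
    rw [factorLoopGo]
    by_cases hpp : p * p ≤ n
    · rw [if_pos (by simpa using hpp)]
      have hm : ¬ (PySem.Int.mod n p == 0) = true := by
        rw [beq_iff_eq, PySem.Int.mod_eq_zero_iff_dvd]
        exact h p hp hpp
      rw [if_neg hm]
      exact ih n (p + 1) (by omega) h
    · rw [if_neg (by simpa using hpp)]

theorem factorLoop_eq_nil (n p : Int) (hp : 2 ≤ p)
    (h : ∀ q : Int, 2 ≤ q → q * q ≤ n → ¬ q ∣ n) : factorLoop n p = ([], n) :=
  factorLoopGo_eq_nil ((n + 1 - p).toNat) n p hp h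

theorem prime_of_two_divisors (x : Int) (h2 : 2 ≤ x)
    (h : ∀ d : Int, 1 ≤ d → d ∣ x → d = 1 ∨ d = x) : Prime x := by
  apply int_prime_of_nat x h2
  rw [Nat.prime_def_lt]
  refine ⟨by omega, ?_⟩
  intro m hm hdvd
  have hm1 : 1 ≤ m := by
    rcases Nat.eq_zero_or_pos m with h0 | h0
    · subst h0; simp at hdvd; omega
    · exact h0
  have : (m : Int) ∣ x := by
    have : (m : Int) ∣ (x.toNat : Int) := Int.natCast_dvd_natCast.mpr hdvd
    rwa [Int.toNat_of_nonneg (by omega)] at this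
  rcases h (m : Int) (by exact_mod_cast hm1) this with hh | hh
  · exact_mod_cast hh
  · omega

theorem no_sqrt_divisor_of_prime (x : Int) (h2 : 2 ≤ x) (hp : Prime x) :
    ∀ q : Int, 2 ≤ q → q * q ≤ x → ¬ q ∣ x := by
  intro q hq1 hq2 hq3
  rcases prime_dvd_eq x q hp h2 (by omega) hq3 with h | h
  · omega
  · subst h; nlinarith

theorem le_pyIntSqrt_iff (e x : Int) (he : 0 ≤ e) (hx : 0 ≤ x) :
    e ≤ pyIntSqrt x ↔ e * e ≤ x := by
  unfold pyIntSqrt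
  constructor
  · intro h
    have h1 : e.toNat ≤ Nat.sqrt x.toNat := by omega
    have h2 : e.toNat * e.toNat ≤ x.toNat := Nat.le_sqrt.mp h1
    have h' : (e.toNat : Int) * (e.toNat : Int) ≤ (x.toNat : Int) := by exact_mod_cast h2
    rwa [Int.toNat_of_nonneg he, Int.toNat_of_nonneg hx] at h'
  · intro h
    have hee : e.toNat * e.toNat ≤ x.toNat := by
      have h' : (e.toNat : Int) * (e.toNat : Int) ≤ (x.toNat : Int) := by
        rw [Int.toNat_of_nonneg he, Int.toNat_of_nonneg hx]; exact h
      exact_mod_cast h'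
    have h2 : e.toNat ≤ Nat.sqrt x.toNat := Nat.le_sqrt.mpr hee
    omega

-- A's conditional-append loop is the flatMap of the filtered range.
theorem flatMap_ite (L : List Int) (p : Int → Bool) (g : Int → List Int) :
    L.flatMap (fun y => if p y then g y else []) = (L.filter p).flatMap g := by
  induction L with
  | nil => simp
  | cons a t ih => by_cases hp : p a <;> simp [hp, ih]

theorem foldl_if_append_pair (L : List Int) (p : Int → Bool) (g : Int → List Int) :
    L.foldl (fun acc xin => if p xin then acc ++ g xin else acc) [] =
      (L.filter p).flatMap g := by
  have h : (fun (acc : List Int) xin => if p xin then acc ++ g xin else acc) =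
      (fun acc xin => acc ++ (if p xin then g xin else [])) := by
    funext acc xin; by_cases hp : p xin <;> simp [hp]
  rw [h, PySem.List.foldl_append_eq_flatMap, List.nil_append, flatMap_ite]

theorem truncdiv_eq_floordiv (x d : Int) (hx : 0 ≤ x) (hd : 0 < d) :
    PySem.Int.truncdiv x d = PySem.Int.floordiv x d := by
  rw [PySem.Int.floordiv_eq_ediv_of_pos hd]
  exact Int.tdiv_eq_ediv_of_nonneg hx

theorem takeWhile_sq_eq_filter (x : Int) (l : List Int) (hl : l.Pairwise (· < ·))
    (hpos : ∀ d ∈ l, 1 ≤ d) :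
    l.takeWhile (fun d => decide (d * d ≤ x)) = l.filter (fun d => decide (d * d ≤ x)) := by
  induction l with
  | nil => rfl
  | cons a t ih =>
    by_cases hp : a * a ≤ x
    · rw [List.takeWhile_cons_of_pos (by simpa using hp), List.filter_cons_of_pos (by simpa using hp)]
      exact congrArg _ (ih hl.of_cons (fun d hd => hpos d (List.mem_cons_of_mem a hd)))
    · rw [List.takeWhile_cons_of_neg (by simpa using hp), List.filter_cons_of_neg (by simpa using hp)]
      symm
      rw [List.filter_eq_nil_iff]
      intro b hb
      have hab : a < b := (List.pairwise_cons.mp hl).1 b hb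
      have ha1 : 1 ≤ a := hpos a (List.mem_cons_self)
      simp only [decide_eq_true_eq]
      nlinarith

theorem asalmi_eq_true_iff (x : Int) (hx : 0 ≤ x) :
    asalmi x = true ↔ ∀ e : Int, 2 ≤ e → e * e ≤ x → ¬ e ∣ x := by
  simp only [asalmi, Bool.not_eq_eq_eq_not, Bool.not_true, List.any_eq_false,
    PySem.List.mem_pyRange_one, beq_iff_eq, and_imp]
  constructor
  · intro h e he1 he2 hdvd
    have : e ≤ pyIntSqrt x := (le_pyIntSqrt_iff e x (by omega) hx).mpr he2
    have := h e he1 (by omega)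
    rw [PySem.Int.mod_eq_zero_iff_dvd] at this
    exact this hdvd
  · intro h e he1 he2
    rw [PySem.Int.mod_eq_zero_iff_dvd]
    exact h e he1 ((le_pyIntSqrt_iff e x (by omega) hx).mp (by omega))

theorem alt_eq (x : Int) (hx2 : ¬ x < 2) : carpanbul_alt x =
    (if fullFacOf (factorLoop x 2) == [(x, 1)] then [x, 1]
     else ((PySem.List.sorted (prodAll (fullFacOf (factorLoop x 2))) (fun d => d) false).takeWhile
       (fun d => decide (d * d ≤ x))).flatMap (fun d => [d, PySem.Int.floordiv x d])) := by
  unfold carpanbul_alt fullFacOf prodAll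
  rw [if_neg hx2]

theorem composite_lists (x : Int) (hx2 : 2 ≤ x) (hgood : GoodFac x (fullFacOf (factorLoop x 2))) :
    ((PySem.List.sorted (prodAll (fullFacOf (factorLoop x 2))) (fun d => d) false).takeWhile
       (fun d => decide (d * d ≤ x)))
      = (PySem.List.pyRange 1 (pyIntSqrt x + 1) 1).filter (fun d => PySem.Int.mod x d == 0) := by
  set F := fullFacOf (factorLoop x 2) with hF
  set CF := (PySem.List.pyRange 1 (x + 1) 1).filter (fun d => PySem.Int.mod x d == 0) with hCF
  have hmemCF : ∀ d : Int, d ∈ CF ↔ 1 ≤ d ∧ d ∣ x := by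
    intro d
    rw [hCF, List.mem_filter, PySem.List.mem_pyRange_one, beq_iff_eq,
      PySem.Int.mod_eq_zero_iff_dvd]
    constructor
    · rintro ⟨⟨h1, _⟩, h2⟩; exact ⟨h1, h2⟩
    · rintro ⟨h1, h2⟩
      exact ⟨⟨h1, by have := Int.le_of_dvd (by omega) h2; omega⟩, h2⟩
  have hndCF : CF.Nodup := (PySem.List.nodup_pyRange_one 1 (x + 1)).filter _
  have hperm : CF.Perm (prodAll F) :=
    (List.perm_ext_iff_of_nodup hndCF hgood.2).mpr
      (fun a => (hmemCF a).trans ((hgood.1 a).symm))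
  have hpw : CF.Pairwise (· < ·) := (PySem.List.pairwise_lt_pyRange_one 1 (x + 1)).filter _
  have hs : PySem.List.sorted (prodAll F) (fun d => d) false = CF :=
    PySem.List.sorted_eq_of_perm_of_pairwise_lt (prodAll F) CF (fun d => d) hperm hpw
  rw [hs, takeWhile_sq_eq_filter x CF hpw (fun d hd => ((hmemCF d).mp hd).1)]
  rw [hCF, List.filter_filter]
  have hsplit : PySem.List.pyRange 1 (x + 1) 1 =
      PySem.List.pyRange 1 (pyIntSqrt x + 1) 1 ++ PySem.List.pyRange (pyIntSqrt x + 1) (x + 1) 1 := by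
    apply PySem.List.pyRange_one_append
    · unfold pyIntSqrt; omega
    · unfold pyIntSqrt
      have := Nat.sqrt_le_self x.toNat
      omega
  rw [hsplit, List.filter_append]
  have hsecond : (PySem.List.pyRange (pyIntSqrt x + 1) (x + 1) 1).filter
      (fun a => decide (a * a ≤ x) && (PySem.Int.mod x a == 0)) = [] := by
    rw [List.filter_eq_nil_iff]
    intro a ha
    rw [PySem.List.mem_pyRange_one] at ha
    have h1 : ¬ a ≤ pyIntSqrt x := by omega
    have h2 : ¬ a * a ≤ x := fun hc =>
      h1 ((le_pyIntSqrt_iff a x (by unfold pyIntSqrt at ha; omega) (by omega)).mpr hc)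
    simp [h2]
  have hfirst : (PySem.List.pyRange 1 (pyIntSqrt x + 1) 1).filter
      (fun a => decide (a * a ≤ x) && (PySem.Int.mod x a == 0)) =
      (PySem.List.pyRange 1 (pyIntSqrt x + 1) 1).filter (fun d => PySem.Int.mod x d == 0) := by
    apply List.filter_congr
    intro a ha
    rw [PySem.List.mem_pyRange_one] at ha
    have h1 : a * a ≤ x := (le_pyIntSqrt_iff a x (by omega) (by omega)).mp (by omega)
    simp [h1]
  rw [hsecond, hfirst, List.append_nil]

-- ===== VERDICT =====
theorem carpanbul_spec : Claim_equal_carpanbul := by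
  intro x _ hpre
  unfold Spec_carpanbul
  have hpre' : (0 : Int) ≤ x := hpre
  rcases lt_or_ge x 2 with hx2 | hx2
  · have hB : carpanbul_alt x = [x, 1] := by
      unfold carpanbul_alt; rw [if_pos hx2]
    rw [hB]
    rcases (by omega : x = 0 ∨ x = 1) with rfl | rfl <;> decide
  · have hgood : GoodFac x (fullFacOf (factorLoop x 2)) :=
      factorLoop_spec x 2 (by omega) (by omega) (by intro q h1 h2; omega)
    by_cases hpr : Prime x
    · have hA : asalmi x = true :=
        (asalmi_eq_true_iff x (by omega)).mpr (no_sqrt_divisor_of_prime x hx2 hpr)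
      have hfl : factorLoop x 2 = ([], x) :=
        factorLoop_eq_nil x 2 (by omega) (no_sqrt_divisor_of_prime x hx2 hpr)
      have hfull : fullFacOf (factorLoop x 2) = [(x, 1)] := by
        rw [hfl]; simp [fullFacOf]; omega
      rw [alt_eq x (by omega), if_pos (by rw [hfull]; simp)]
      unfold carpanbul
      rw [if_pos hA]
    · have hA : ¬ asalmi x = true := by
        intro hc
        exact hpr (prime_of_no_sqrt_divisor x hx2
          (fun q hq1 hq2 => ((asalmi_eq_true_iff x (by omega)).mp hc) q hq1 hq2))
      have hfull : fullFacOf (factorLoop x 2) ≠ [(x, 1)] := by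
        intro hc
        apply hpr
        apply prime_of_two_divisors x hx2
        intro d hd1 hd2
        have hd3 : d ∈ prodAll (fullFacOf (factorLoop x 2)) := (hgood.1 d).mpr ⟨hd1, hd2⟩
        rw [hc] at hd3
        rw [prodAll, prodAll_cons] at hd3
        simp [divStep] at hd3
        rcases hd3 with ⟨k, hk, hdk⟩
        interval_cases k <;> simp at hdk <;> omega
      rw [alt_eq x (by omega), if_neg (by simp [hfull])]
      unfold carpanbul
      rw [if_neg hA, foldl_if_append_pair, composite_lists x hx2 hgood]
      apply List.flatMap_congr
      intro d hd
      rw [List.mem_filter, PySem.List.mem_pyRange_one] at hd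
      rw [truncdiv_eq_floordiv x d (by omega) (by omega)]
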